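-- pv_equiv track=rewrite | github.com/grahamiancummins/gdblocks | portfors/rdj.py | howgrouped
-- ===== SOURCE A (Python) =====
-- def howgrouped(stims, cids):
--     sids = sorted(list(set(stims)))
--     allcids = sorted(list(set(cids)))
--     grps = {}
--     for s in sids:
--         grps[s] = dict([(k, 0) for k in allcids])
--     for i, si in enumerate(stims):
--         ci = cids[i]
--         grps[si][ci] = grps[si][ci] + 1
--     return grps
-- ===== SOURCE B (Python) =====
-- def howgrouped(stims, cids):
--     pairs = [(stims[i], cids[i]) for i in range(len(stims))]
--     sids = sorted(set(stims))
--     allcids = sorted(set(cids))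
--     return {s: {c: pairs.count((s, c)) for c in allcids} for s in sids}
-- ===== Notes on version B (the rewrite author's own statement) =====
-- stated objective: alternative
-- what changed: B drops A's pre-initialized nested dict incremented in place: it materializes the (stim, cid) pair list once and fills each cell of the sorted cross-tab by a direct pairs.count scan, trading A's single counting pass for per-cell scans.
import Mathlib
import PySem

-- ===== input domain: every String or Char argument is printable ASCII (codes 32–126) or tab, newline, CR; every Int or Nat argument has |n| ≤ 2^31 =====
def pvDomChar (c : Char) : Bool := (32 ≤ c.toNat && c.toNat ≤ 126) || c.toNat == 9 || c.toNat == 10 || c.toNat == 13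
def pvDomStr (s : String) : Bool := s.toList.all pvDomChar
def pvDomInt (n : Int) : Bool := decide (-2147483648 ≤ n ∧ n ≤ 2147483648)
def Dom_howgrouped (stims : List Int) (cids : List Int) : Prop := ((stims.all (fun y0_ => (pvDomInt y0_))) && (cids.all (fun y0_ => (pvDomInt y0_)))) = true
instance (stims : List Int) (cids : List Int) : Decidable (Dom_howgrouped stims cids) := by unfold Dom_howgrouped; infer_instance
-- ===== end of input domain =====

-- B replaces A's single pass that increments a pre-initialized nested dict by a
-- materialized (stim, cid) pair list whose cells are filled by direct pairs.count
-- scans (objective: alternative algorithm; not faster).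

-- ===== PORT A =====
def howgrouped (stims : List Int) (cids : List Int) : List (Int × List (Int × Int)) :=
  let sids := PySem.List.sorted (PySem.Set.ofList stims) (fun x => x) false
  let allcids := PySem.List.sorted (PySem.Set.ofList cids) (fun x => x) false
  let grps0 : PySem.Dict Int (PySem.Dict Int Int) :=
    sids.foldl (fun g s =>
      g.insert s (PySem.Dict.ofList (allcids.map (fun k => (k, (0 : Int)))))) PySem.Dict.empty
  let grps1 := (PySem.List.enumerate stims).foldl (fun g p =>
      -- ci = cids[i]: pyGetD is the total form, exact under Pre_ (i < len(cids))
      let ci := PySem.List.pyGetD cids p.1 0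
      -- grps[si][ci] = grps[si][ci] + 1 (si is always a key of grps, ci a key of the inner dict)
      let inner := g.getD p.2 PySem.Dict.empty
      g.insert p.2 (inner.insert ci (inner.getD ci 0 + 1))) grps0
  grps1.items.map (fun p => (p.1, p.2.items))

-- ===== PORT B =====
def howgrouped_alt (stims : List Int) (cids : List Int) : List (Int × List (Int × Int)) :=
  -- pairs = [(stims[i], cids[i]) for i in range(len(stims))] (pyGetD exact under Pre_)
  let pairs := (PySem.List.pyRange 0 (PySem.List.len stims) 1).map
    (fun i => (PySem.List.pyGetD stims i 0, PySem.List.pyGetD cids i 0))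
  let sids := PySem.List.sorted (PySem.Set.ofList stims) (fun x => x) false
  let allcids := PySem.List.sorted (PySem.Set.ofList cids) (fun x => x) false
  sids.map (fun s => (s, allcids.map (fun c => (c, (PySem.List.count pairs (s, c) : Int)))))

-- ===== PRECONDITION & SPEC =====
-- A evaluates cids[i] for every index i of stims, so it raises IndexError exactly
-- when cids is shorter than stims; Pre_ excludes exactly those inputs.
def Pre_howgrouped (stims : List Int) (cids : List Int) : Prop :=
  stims.length ≤ cids.length
instance (stims : List Int) (cids : List Int) : Decidable (Pre_howgrouped stims cids) := by
  unfold Pre_howgrouped; infer_instance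

def pvWitness_howgrouped : List Int × List Int := ([1, 2, 1], [5, 6, 5])

def Spec_howgrouped (stims : List Int) (cids : List Int) (out : List (Int × List (Int × Int))) : Prop := out = howgrouped_alt stims cids
instance (stims : List Int) (cids : List Int) (out : List (Int × List (Int × Int))) : Decidable (Spec_howgrouped stims cids out) := by unfold Spec_howgrouped; infer_instance

-- ===== CLAIM (what is proved, stated in full; the proofs are below) =====
def Claim_equal_howgrouped : Prop := ∀ (stims : List Int) (cids : List Int), Dom_howgrouped stims cids → Pre_howgrouped stims cids → Spec_howgrouped stims cids (howgrouped stims cids)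

-- ===== LEMMAS AND PROOFS =====

-- the list of (stim, cid) pairs both programs effectively count
def pvPairs (stims cids : List Int) : List (Int × Int) :=
  (PySem.List.enumerate stims).map (fun p => (p.2, PySem.List.pyGetD cids p.1 0))

-- the dense dict-of-dicts over sids × allcids with entry f (s, c)
def pvG (sids allcids : List Int) (f : Int × Int → Int) : PySem.Dict Int (PySem.Dict Int Int) :=
  PySem.Dict.mk (sids.map (fun s =>
    (s, PySem.Dict.mk (allcids.map (fun c => (c, f (s, c)))))))

lemma pvG_congr (sids allcids : List Int) (f f' : Int × Int → Int)
    (h : ∀ r, f r = f' r) : pvG sids allcids f = pvG sids allcids f' := by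
  have : f = f' := funext h
  rw [this]

lemma pvG_keys (sids allcids : List Int) (f : Int × Int → Int) :
    (pvG sids allcids f).keys = sids := by
  simp [pvG, PySem.Dict.keys_mk, Function.comp_def]

lemma pvG_getD (sids allcids : List Int) (hs : sids.Nodup) (f : Int × Int → Int)
    {s : Int} (h : s ∈ sids) :
    (pvG sids allcids f).getD s PySem.Dict.empty
      = PySem.Dict.mk (allcids.map (fun c => (c, f (s, c)))) := by
  apply PySem.Dict.getD_of_mem_items
  · exact List.mem_map.mpr ⟨s, h, rfl⟩
  · rw [pvG_keys]; exact hs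

lemma pvInner_getD (allcids : List Int) (hc : allcids.Nodup) (g : Int → Int)
    {c : Int} (h : c ∈ allcids) :
    (PySem.Dict.mk (allcids.map (fun c => (c, g c)))).getD c 0 = g c := by
  apply PySem.Dict.getD_of_mem_items
  · exact List.mem_map.mpr ⟨c, h, rfl⟩
  · simpa [PySem.Dict.keys_mk, Function.comp_def] using hc

lemma pvStep (sids allcids : List Int) (hs : sids.Nodup) (hc : allcids.Nodup)
    (f : Int × Int → Int) (q : Int × Int) (hq1 : q.1 ∈ sids) (hq2 : q.2 ∈ allcids) :
    (let inner := (pvG sids allcids f).getD q.1 PySem.Dict.empty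
     (pvG sids allcids f).insert q.1 (inner.insert q.2 (inner.getD q.2 0 + 1)))
      = pvG sids allcids (fun r => if r = q then f r + 1 else f r) := by
  have hinner := pvG_getD sids allcids hs f hq1
  simp only [hinner]
  have hval : (PySem.Dict.mk (allcids.map (fun c => (c, f (q.1, c))))).getD q.2 0
      = f (q.1, q.2) := pvInner_getD allcids hc _ hq2
  rw [hval]
  -- inner insert: q.2 is already a key
  have hcontc : (PySem.Dict.mk (allcids.map (fun c => (c, f (q.1, c))))).contains q.2 = true := by
    rw [PySem.Dict.contains_eq_decide_mem_keys]
    simp [PySem.Dict.keys_mk, hq2]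
  have hconts : (pvG sids allcids f).contains q.1 = true := by
    rw [PySem.Dict.contains_eq_decide_mem_keys, pvG_keys]
    simp [hq1]
  apply PySem.Dict.ext
  rw [PySem.Dict.items_insert_of_contains _ _ hconts]
  simp only [pvG, List.map_map]
  apply List.map_congr_left
  intro s _
  simp only [Function.comp]
  by_cases hss : s = q.1
  · subst hss
    simp only [BEq.rfl, if_true]
    congr 1
    apply PySem.Dict.ext
    rw [PySem.Dict.items_insert_of_contains _ _ hcontc]
    simp only [List.map_map]
    apply List.map_congr_left
    intro c _
    simp only [Function.comp]
    by_cases hcc : c = q.2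
    · subst hcc; simp
    · simp [hcc, Prod.ext_iff]
  · simp only [beq_iff_eq, hss, if_false]
    congr 1
    apply PySem.Dict.ext
    apply List.map_congr_left
    intro c _
    have : (s, c) ≠ q := by
      intro h; apply hss; rw [← h]
    simp [this]

lemma pvLoop (sids allcids : List Int) (hs : sids.Nodup) (hc : allcids.Nodup)
    (l : List (Int × Int)) (h : ∀ q ∈ l, q.1 ∈ sids ∧ q.2 ∈ allcids)
    (f : Int × Int → Int) :
    l.foldl (fun g q =>
        let inner := g.getD q.1 PySem.Dict.empty
        g.insert q.1 (inner.insert q.2 (inner.getD q.2 0 + 1))) (pvG sids allcids f)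
      = pvG sids allcids (fun r => f r + l.count r) := by
  induction l generalizing f with
  | nil => simp [List.count_nil]
  | cons q t ih =>
    have hq := h q (List.mem_cons_self)
    have ht : ∀ r ∈ t, r.1 ∈ sids ∧ r.2 ∈ allcids := fun r hr => h r (List.mem_cons_of_mem _ hr)
    rw [List.foldl_cons]
    rw [pvStep sids allcids hs hc f q hq.1 hq.2]
    rw [ih ht]
    apply pvG_congr
    intro r
    by_cases hr : r = q
    · subst hr; simp; omega
    · have hq' : ¬ q = r := fun h => hr h.symm
      simp [hr, hq']

lemma pvMem_pairs (stims cids : List Int) (hpre : stims.length ≤ cids.length)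
    (q : Int × Int) (hq : q ∈ pvPairs stims cids) :
    q.1 ∈ stims ∧ q.2 ∈ cids := by
  simp only [pvPairs, List.mem_map] at hq
  obtain ⟨p, hp, rfl⟩ := hq
  rw [PySem.List.mem_enumerate_iff] at hp
  obtain ⟨k, hk, rfl⟩ := hp
  constructor
  · exact List.getElem_mem hk
  · have hk' : k < cids.length := lt_of_lt_of_le hk hpre
    simp only [zero_add]
    rw [PySem.List.pyGetD_natCast]
    rw [List.getD_eq_getElem _ _ hk']
    exact List.getElem_mem hk'

lemma pvOfList_nodup (allcids : List Int) (hc : allcids.Nodup) :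
    PySem.Dict.ofList (allcids.map (fun k => (k, (0 : Int))))
      = PySem.Dict.mk (allcids.map (fun c => (c, (0 : Int)))) := by
  apply PySem.Dict.ext
  show (List.foldl (fun acc p => acc.insert p.1 p.2) PySem.Dict.empty
      (allcids.map (fun k => (k, (0 : Int))))).items = _
  have h1 := PySem.Dict.items_foldl_insert_fresh
      (allcids.map (fun k => (k, (0 : Int)))) Prod.fst Prod.snd PySem.Dict.empty
      (fun a _ => PySem.Dict.contains_empty _) (by simpa [Function.comp_def] using hc)
  simpa [PySem.Dict.empty] using h1

lemma pvInit (sids allcids : List Int) (hs : sids.Nodup) (hc : allcids.Nodup) :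
    sids.foldl (fun g s =>
        g.insert s (PySem.Dict.ofList (allcids.map (fun k => (k, (0 : Int)))))) PySem.Dict.empty
      = pvG sids allcids (fun _ => 0) := by
  apply PySem.Dict.ext
  have h1 := PySem.Dict.items_foldl_insert_fresh sids (fun s => s)
      (fun _ => PySem.Dict.ofList (allcids.map (fun k => (k, (0 : Int))))) PySem.Dict.empty
      (fun a _ => PySem.Dict.contains_empty _) (by simpa using hs)
  rw [h1]
  simp only [pvG, PySem.Dict.empty, List.nil_append]
  apply List.map_congr_left
  intro s _
  rw [pvOfList_nodup allcids hc]

-- B's pair list coincides with the pair list A's loop runs over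
lemma pvPairs_eq (stims cids : List Int) :
    (PySem.List.pyRange 0 (PySem.List.len stims) 1).map
      (fun i => (PySem.List.pyGetD stims i 0, PySem.List.pyGetD cids i 0))
    = pvPairs stims cids := by
  rw [pvPairs, PySem.List.enumerate_eq_map_pyRange stims 0, List.map_map]
  rfl

-- ===== VERDICT (by name: the statement is the Claim_ definition above) =====
theorem howgrouped_spec : Claim_equal_howgrouped := by
  intro stims cids _ hpre
  unfold Spec_howgrouped howgrouped howgrouped_alt
  have hs : (PySem.List.sorted (PySem.Set.ofList stims) (fun x => x) false).Nodup :=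
    ((PySem.List.sorted_perm _ _ _).nodup_iff).mpr (PySem.Set.nodup_ofList stims)
  have hc : (PySem.List.sorted (PySem.Set.ofList cids) (fun x => x) false).Nodup :=
    ((PySem.List.sorted_perm _ _ _).nodup_iff).mpr (PySem.Set.nodup_ofList cids)
  set sids := PySem.List.sorted (PySem.Set.ofList stims) (fun x => x) false with hsids
  set allcids := PySem.List.sorted (PySem.Set.ofList cids) (fun x => x) false with hallcids
  -- A's increment loop, rewritten as a fold over the pair list
  have hA : (PySem.List.enumerate stims).foldl (fun g p =>
        let ci := PySem.List.pyGetD cids p.1 0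
        let inner := g.getD p.2 PySem.Dict.empty
        g.insert p.2 (inner.insert ci (inner.getD ci 0 + 1)))
        (pvG sids allcids (fun _ => 0))
      = pvG sids allcids (fun r => 0 + (pvPairs stims cids).count r) := by
    rw [← pvLoop sids allcids hs hc (pvPairs stims cids) ?_ (fun _ => 0)]
    · rw [pvPairs, List.foldl_map]
    · intro q hq
      have := pvMem_pairs stims cids hpre q hq
      exact ⟨(PySem.List.mem_sorted _ _ _ _).mpr ((PySem.Set.mem_ofList _ _).mpr this.1),
             (PySem.List.mem_sorted _ _ _ _).mpr ((PySem.Set.mem_ofList _ _).mpr this.2)⟩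
  simp only [pvInit sids allcids hs hc, hA, pvPairs_eq stims cids]
  simp only [pvG, List.map_map]
  apply List.map_congr_left
  intro s _
  refine Prod.ext rfl ?_
  show (allcids.map (fun c => (c, 0 + ((pvPairs stims cids).count (s, c) : Int)))) = _
  apply List.map_congr_left
  intro c _
  refine Prod.ext rfl ?_
  rw [PySem.List.count_eq]
  omega
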